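-- pv_equiv track=rewrite | github.com/kobejean/cp-library | cp_library/math/fzt.py | fzt
-- ===== SOURCE A (Python) =====
-- def fzt(A):
--     N = len(A).bit_length()-1
--
--     for i in range(N):
--         bit = 1 << i
--         for mask in range(1 << N):
--             if mask & bit:
--                 A[mask] += A[mask ^ bit]
--
--     return A
-- ===== SOURCE B (Python) =====
-- def _zeta(a):
--     # divide and conquer: transform each half, then add the transformed low half
--     # into the transformed high half (the top bit's contribution)
--     if len(a) <= 1:
--         return a[:]
--     h = len(a) // 2
--     lo = _zeta(a[:h])
--     hi = _zeta(a[h:])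
--     return lo + [x + y for x, y in zip(hi, lo)]
--
-- def fzt(A):
--     # Divide-and-conquer re-implementation of the subset-sum (zeta) transform on the
--     # 2^N-prefix; the tail (indices >= 2^N) is untouched. Mutates A in place like the
--     # original and returns it.
--     if not A:
--         return A
--     N = len(A).bit_length() - 1
--     size = 1 << N
--     A[:size] = _zeta(A[:size])
--     return A
-- ===== Notes on version B (the rewrite author's own statement) =====
-- stated objective: alternative
-- what changed: Replaces the layered in-place fast zeta transform (one accumulation pass per bit over the whole 2^N-prefix) by a divide-and-conquer recursion that transforms each half of the prefix and then adds the transformed low half into the transformed high half, leaving the tail untouched.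
import Mathlib
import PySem

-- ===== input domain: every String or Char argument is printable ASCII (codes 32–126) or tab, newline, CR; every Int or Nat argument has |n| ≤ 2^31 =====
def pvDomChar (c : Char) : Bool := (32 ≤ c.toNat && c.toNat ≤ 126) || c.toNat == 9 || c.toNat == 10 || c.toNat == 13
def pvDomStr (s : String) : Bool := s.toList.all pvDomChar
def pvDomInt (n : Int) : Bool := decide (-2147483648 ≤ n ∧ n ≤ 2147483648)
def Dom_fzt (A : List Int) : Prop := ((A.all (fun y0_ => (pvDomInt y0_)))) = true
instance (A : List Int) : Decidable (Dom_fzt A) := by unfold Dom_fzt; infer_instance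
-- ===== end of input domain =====

-- B replaces A's layered in-place fast zeta transform (one pass per bit over the whole
-- prefix) by a divide-and-conquer recursion: transform each half of the 2^N-prefix,
-- then add the transformed low half into the transformed high half.
-- Python A mutates its argument in place and returns it; B performs the same in-place
-- mutation; the equivalence proved here is about the returned value.

-- ===== PORT A =====
-- `len(A).bit_length()` is `Nat.size`; Python's `N = bit_length - 1` is -1 only for
-- len = 0, where `range(-1) = range(0) = []`, so Nat truncated subtraction is exact.
-- All indices `mask`, `mask ^ bit` are < 2^N ≤ len A, so `getD _ 0` is Python's exact
-- (never-failing) indexing here.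
def fzt (A : List Int) : List Int :=
  (List.range (A.length.size - 1)).foldl (fun acc i =>
    (List.range (2 ^ (A.length.size - 1))).foldl (fun acc2 mask =>
      if mask &&& (2 ^ i) ≠ 0 then
        acc2.set mask (acc2.getD mask 0 + acc2.getD (mask ^^^ (2 ^ i)) 0)
      else acc2) acc) A

-- ===== PORT B =====
-- `_zeta`; Python's `a[:]` copy is the identity on immutable Lean lists.
def pvZeta (a : List Int) : List Int :=
  if a.length ≤ 1 then a
  else
    (pvZeta (a.take (a.length / 2))) ++
      (((pvZeta (a.drop (a.length / 2))).zip (pvZeta (a.take (a.length / 2)))).map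
        (fun p => p.1 + p.2))
termination_by a.length
decreasing_by
  all_goals simp only [List.length_take, List.length_drop]
  all_goals omega

-- `A[:size] = _zeta(A[:size]); return A` is `_zeta` on the prefix, tail appended.
def fzt_alt (A : List Int) : List Int :=
  if A = [] then A
  else pvZeta (A.take (2 ^ (A.length.size - 1))) ++ A.drop (2 ^ (A.length.size - 1))

-- ===== PRECONDITION & SPEC =====
def Spec_fzt (A : List Int) (out : List Int) : Prop := out = fzt_alt A
instance (A : List Int) (out : List Int) : Decidable (Spec_fzt A out) := by unfold Spec_fzt; infer_instance

-- ===== CLAIM (what is proved, stated in full; the proofs are below) =====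
def Claim_equal_fzt : Prop := ∀ (A : List Int), Dom_fzt A → Spec_fzt A (fzt A)

-- ===== LEMMAS AND PROOFS =====

-- `d` is a submask of `k` iff every set bit of `d` is set in `k`.
theorem pv_subset_iff (d k : Nat) : d &&& k = d ↔ ∀ j, d.testBit j = true → k.testBit j = true := by
  constructor
  · intro h j hj
    have := congrArg (fun x => x.testBit j) h
    simp only [Nat.testBit_and, hj, Bool.true_and] at this
    exact this
  · intro h
    apply Nat.eq_of_testBit_eq
    intro j
    simp only [Nat.testBit_and]
    cases hd : d.testBit j with
    | false => simp
    | true => simp [h j hd]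

theorem pv_and_two_pow_ne (k j : Nat) : k &&& 2 ^ j ≠ 0 ↔ k.testBit j = true := by
  rw [Nat.and_two_pow]
  cases h : k.testBit j <;> simp

-- flipping a clear bit of `k` keeps submasks not containing that bit
theorem pv_submask_xor (d k j : Nat) (hd : d.testBit j = false) :
    d &&& (k ^^^ 2 ^ j) = d ↔ d &&& k = d := by
  rw [pv_subset_iff, pv_subset_iff]
  constructor <;> intro h m hm
  · have hmj : m ≠ j := by rintro rfl; simp [hm] at hd
    have := h m hm
    simpa [Nat.testBit_xor, Nat.testBit_two_pow_of_ne (Ne.symm hmj)] using this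
  · have hmj : m ≠ j := by rintro rfl; simp [hm] at hd
    simp [Nat.testBit_xor, Nat.testBit_two_pow_of_ne (Ne.symm hmj), h m hm]

theorem pv_two_pow_add_submask (d k j : Nat) (hdlt : d < 2 ^ j) :
    (2 ^ j + d) &&& k = 2 ^ j + d ↔ (k.testBit j = true ∧ d &&& k = d) := by
  have hor : 2 ^ j + d = 2 ^ j ||| d := by
    have := Nat.two_pow_add_eq_or_of_lt hdlt 1
    simpa using this
  have hdj : d.testBit j = false := Nat.testBit_lt_two_pow hdlt
  rw [hor, pv_subset_iff, pv_subset_iff]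
  constructor
  · intro h
    refine ⟨h j (by simp [Nat.testBit_or, Nat.testBit_two_pow_self]), ?_⟩
    intro m hm
    exact h m (by simp [Nat.testBit_or, hm])
  · rintro ⟨hkj, h⟩ m hm
    simp only [Nat.testBit_or] at hm
    by_cases hmj : m = j
    · subst hmj; exact hkj
    · rcases Bool.or_eq_true_iff.mp hm with h1 | h2
      · exact absurd h1 (by simp [Nat.testBit_two_pow_of_ne (Ne.symm hmj)])
      · exact h m h2

theorem pv_xor_two_pow_add (d k j : Nat) (hdlt : d < 2 ^ j) :
    k ^^^ (2 ^ j + d) = (k ^^^ 2 ^ j) ^^^ d := by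
  have hor : 2 ^ j + d = 2 ^ j ||| d := by
    have := Nat.two_pow_add_eq_or_of_lt hdlt 1
    simpa using this
  have hxor : 2 ^ j ||| d = 2 ^ j ^^^ d := by
    apply Nat.eq_of_testBit_eq
    intro m
    by_cases hmj : m = j
    · subst hmj
      simp [Nat.testBit_or, Nat.testBit_xor, Nat.testBit_two_pow_self,
        Nat.testBit_lt_two_pow hdlt]
    · simp [Nat.testBit_or, Nat.testBit_xor, Nat.testBit_two_pow_of_ne (Ne.symm hmj)]
  rw [hor, hxor, Nat.xor_assoc]

-- submask indicator is preserved by the involution d ↦ k ^^^ d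
theorem pv_submask_invol (d k : Nat) : (k ^^^ d) &&& k = k ^^^ d ↔ d &&& k = d := by
  rw [pv_subset_iff, pv_subset_iff]
  constructor <;> intro h m hm
  · by_cases hk : k.testBit m = true
    · exact hk
    · simp only [Bool.not_eq_true] at hk
      have : (k ^^^ d).testBit m = true := by
        simp [Nat.testBit_xor, hm, hk]
      exact h m this
  · by_cases hk : k.testBit m = true
    · exact hk
    · simp only [Nat.testBit_xor] at hm
      simp at hk
      rw [hk] at hm; simp at hm
      exact h m hm

-- the partial subset-sum after the passes for bits 0..j-1
def pvS (orig : List Int) (j k : Nat) : Int :=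
  ∑ d ∈ Finset.range (2 ^ j), if d &&& k = d then orig.getD (k ^^^ d) 0 else 0

theorem pvS_zero (orig : List Int) (k : Nat) : pvS orig 0 k = orig.getD k 0 := by
  simp [pvS]

theorem pvS_succ (orig : List Int) (j k : Nat) :
    pvS orig (j + 1) k =
      pvS orig j k + (if k &&& 2 ^ j ≠ 0 then pvS orig j (k ^^^ 2 ^ j) else 0) := by
  have h2 : 2 ^ (j + 1) = 2 ^ j + 2 ^ j := by ring
  unfold pvS
  rw [h2, Finset.sum_range_add]
  congr 1
  by_cases hk : k.testBit j = true
  · rw [if_pos ((pv_and_two_pow_ne k j).mpr hk)]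
    apply Finset.sum_congr rfl
    intro d hd
    rw [Finset.mem_range] at hd
    have hcond : ((2 ^ j + d) &&& k = 2 ^ j + d) ↔ (d &&& (k ^^^ 2 ^ j) = d) := by
      rw [pv_two_pow_add_submask d k j hd,
        pv_submask_xor d k j (Nat.testBit_lt_two_pow hd)]
      simp [hk]
    rw [pv_xor_two_pow_add d k j hd]
    by_cases h : d &&& (k ^^^ 2 ^ j) = d
    · rw [if_pos (hcond.mpr h), if_pos h]
    · rw [if_neg (fun hc => h (hcond.mp hc)), if_neg h]
  · rw [if_neg (fun hne => hk ((pv_and_two_pow_ne k j).mp hne))]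
    apply Finset.sum_eq_zero
    intro d hd
    rw [Finset.mem_range] at hd
    rw [if_neg]
    intro hc
    exact hk ((pv_two_pow_add_submask d k j hd).mp hc).1

-- the full subset sum, as B computes it
theorem pvS_eq_T (orig : List Int) (n k : Nat) (hk : k < 2 ^ n) :
    pvS orig n k = ∑ t ∈ Finset.range (2 ^ n), if t &&& k = t then orig.getD t 0 else 0 := by
  unfold pvS
  apply Finset.sum_nbij' (i := fun d => k ^^^ d) (j := fun t => k ^^^ t)
  · intro d hd
    rw [Finset.mem_range] at hd ⊢
    exact Nat.xor_lt_two_pow hk hd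
  · intro t ht
    rw [Finset.mem_range] at ht ⊢
    exact Nat.xor_lt_two_pow hk ht
  · intro d _
    simp
  · intro t _
    simp
  · intro d _
    by_cases h : d &&& k = d
    · rw [if_pos h, if_pos ((pv_submask_invol d k).mpr h)]
    · rw [if_neg h, if_neg (fun hc => h ((pv_submask_invol d k).mp hc))]

-- B's getD on the snapshot prefix agrees with A's list, below the prefix length
theorem pv_getD_take (A : List Int) (sz t : Nat) (ht : t < sz) :
    (A.take sz).getD t 0 = A.getD t 0 := by
  rw [List.getD_eq_getElem?_getD, List.getD_eq_getElem?_getD, List.getElem?_take_of_lt ht]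

-- a submask of the low half is a submask of the full mask, and conversely
theorem pv_submask_low (t m j : Nat) (ht : t < 2 ^ j) (hm : m < 2 ^ j) :
    t &&& (2 ^ j + m) = t ↔ t &&& m = t := by
  have hor : 2 ^ j + m = 2 ^ j ||| m := by simpa using Nat.two_pow_add_eq_or_of_lt hm 1
  rw [hor, pv_subset_iff, pv_subset_iff]
  constructor <;> intro h i hi
  · have hij : i ≠ j := by rintro rfl; have := Nat.ge_two_pow_of_testBit hi; omega
    have := h i hi
    rcases Bool.or_eq_true_iff.mp (by simpa [Nat.testBit_or] using this) with h1 | h2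
    · exact absurd h1 (by simp [Nat.testBit_two_pow_of_ne (Ne.symm hij)])
    · exact h2
  · simp [Nat.testBit_or, h i hi]

theorem pv_submask_high (t m j : Nat) (ht : t < 2 ^ j) (hm : m < 2 ^ j) :
    (2 ^ j + t) &&& (2 ^ j + m) = 2 ^ j + t ↔ t &&& m = t := by
  have hort : 2 ^ j + t = 2 ^ j ||| t := by simpa using Nat.two_pow_add_eq_or_of_lt ht 1
  have horm : 2 ^ j + m = 2 ^ j ||| m := by simpa using Nat.two_pow_add_eq_or_of_lt hm 1
  rw [hort, horm, pv_subset_iff, pv_subset_iff]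
  constructor <;> intro h i hi
  · have hij : i ≠ j := by rintro rfl; have := Nat.ge_two_pow_of_testBit hi; omega
    have := h i (by simp [Nat.testBit_or, hi])
    rcases Bool.or_eq_true_iff.mp (by simpa [Nat.testBit_or] using this) with h1 | h2
    · exact absurd h1 (by simp [Nat.testBit_two_pow_of_ne (Ne.symm hij)])
    · exact h2
  · simp only [Nat.testBit_or] at hi ⊢
    rcases Bool.or_eq_true_iff.mp hi with h1 | h2
    · simp [h1]
    · simp [h i h2]

-- a submask is at most its mask
theorem pv_submask_le (t k : Nat) (h : t &&& k = t) : t ≤ k := by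
  calc t = t &&& k := h.symm
    _ ≤ k := Nat.and_le_right

theorem pv_getD_drop (L : List Int) (h t : Nat) :
    (L.drop h).getD t 0 = L.getD (h + t) 0 := by
  rw [List.getD_eq_getElem?_getD, List.getD_eq_getElem?_getD, List.getElem?_drop]

theorem pv_getD_zip_add (x y : List Int) (m : Nat) (hx : m < x.length) (hy : m < y.length) :
    ((x.zip y).map (fun p => p.1 + p.2)).getD m 0 = x.getD m 0 + y.getD m 0 := by
  simp [List.getD_eq_getElem?_getD, List.zip, List.getElem?_zipWith,
    List.getElem?_eq_getElem hx, List.getElem?_eq_getElem hy]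

theorem pvZeta_length (n : Nat) (L : List Int) (hL : L.length = 2 ^ n) :
    (pvZeta L).length = L.length := by
  induction n generalizing L with
  | zero => unfold pvZeta; rw [if_pos (by simp [hL])]
  | succ n ih =>
    have h2 : (2 : Nat) ^ (n + 1) = 2 ^ n + 2 ^ n := by ring
    have hpos : 0 < 2 ^ n := Nat.two_pow_pos n
    unfold pvZeta
    rw [if_neg (by omega)]
    have hhalf : L.length / 2 = 2 ^ n := by omega
    have hto : (L.take (L.length / 2)).length = 2 ^ n := by
      rw [List.length_take]; omega
    have hdo : (L.drop (L.length / 2)).length = 2 ^ n := by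
      rw [List.length_drop]; omega
    rw [List.length_append, List.length_map, List.length_zip,
      ih _ hto, ih _ hdo, hto, hdo, hL, h2]
    omega

theorem pvZeta_getD (n : Nat) (L : List Int) (hL : L.length = 2 ^ n) (k : Nat)
    (hk : k < 2 ^ n) :
    (pvZeta L).getD k 0 =
      ∑ t ∈ Finset.range (2 ^ n), if t &&& k = t then L.getD t 0 else 0 := by
  induction n generalizing L k with
  | zero =>
    unfold pvZeta
    rw [if_pos (by simp [hL])]
    interval_cases k
    simp
  | succ n ih =>
    have h2 : (2 : Nat) ^ (n + 1) = 2 ^ n + 2 ^ n := by ring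
    have hpos : 0 < 2 ^ n := Nat.two_pow_pos n
    unfold pvZeta
    rw [if_neg (by omega)]
    have hhalf : L.length / 2 = 2 ^ n := by omega
    have hto : (L.take (L.length / 2)).length = 2 ^ n := by
      rw [List.length_take]; omega
    have hdo : (L.drop (L.length / 2)).length = 2 ^ n := by
      rw [List.length_drop]; omega
    have hlo := pvZeta_length n _ hto
    have hhi := pvZeta_length n _ hdo
    rw [h2, Finset.sum_range_add]
    by_cases hk2 : k < 2 ^ n
    · -- low half: the high-half terms of the sum vanish
      rw [List.getD_eq_getElem?_getD, List.getElem?_append_left (by rw [hlo, hto]; omega),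
        ← List.getD_eq_getElem?_getD, ih _ hto k hk2]
      have hz : ∀ t ∈ Finset.range (2 ^ n),
          (if (2 ^ n + t) &&& k = 2 ^ n + t then L.getD (2 ^ n + t) 0 else 0) = 0 := by
        intro t _
        rw [if_neg]
        intro hc
        have := pv_submask_le _ _ hc
        omega
      rw [Finset.sum_congr rfl hz, Finset.sum_const_zero, add_zero]
      apply Finset.sum_congr rfl
      intro t ht
      rw [Finset.mem_range] at ht
      rw [pv_getD_take L _ t (by omega)]
    · -- high half
      have hmlt : k - 2 ^ n < 2 ^ n := by omega
      have hkm : k = 2 ^ n + (k - 2 ^ n) := by omega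
      rw [List.getD_eq_getElem?_getD, List.getElem?_append_right (by rw [hlo, hto]; omega),
        ← List.getD_eq_getElem?_getD, hlo, hto,
        pv_getD_zip_add _ _ _ (by rw [hhi, hdo]; omega) (by rw [hlo, hto]; omega),
        ih _ hdo _ hmlt, ih _ hto _ hmlt]
      have hlow : ∀ t ∈ Finset.range (2 ^ n),
          (if t &&& k = t then L.getD t 0 else 0) =
          (if t &&& (k - 2 ^ n) = t then (L.take (L.length / 2)).getD t 0 else 0) := by
        intro t ht
        rw [Finset.mem_range] at ht
        rw [pv_getD_take L _ t (by omega)]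
        refine if_congr ?_ rfl rfl
        conv_lhs => rw [hkm]
        exact pv_submask_low t _ n ht hmlt
      have hhigh : ∀ t ∈ Finset.range (2 ^ n),
          (if (2 ^ n + t) &&& k = 2 ^ n + t then L.getD (2 ^ n + t) 0 else 0) =
          (if t &&& (k - 2 ^ n) = t then (L.drop (L.length / 2)).getD t 0 else 0) := by
        intro t ht
        rw [Finset.mem_range] at ht
        rw [pv_getD_drop L _ t, hhalf]
        refine if_congr ?_ rfl rfl
        conv_lhs => rw [hkm]
        exact pv_submask_high t _ n ht hmlt
      rw [Finset.sum_congr rfl hlow, Finset.sum_congr rfl hhigh]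
      ring

theorem pv_xor_bit_clear (m j : Nat) (h : m &&& 2 ^ j ≠ 0) : (m ^^^ 2 ^ j) &&& 2 ^ j = 0 := by
  rw [pv_and_two_pow_ne] at h
  rw [Nat.and_two_pow, Nat.testBit_xor, h, Nat.testBit_two_pow_self]
  simp

-- one inner pass (bit j), processed for masks < m
theorem pv_pass_invariant (j m : Nat) (B : List Int) (hm : m ≤ B.length) :
    ((List.range m).foldl (fun acc2 mask =>
        if mask &&& (2 ^ j) ≠ 0 then
          acc2.set mask (acc2.getD mask 0 + acc2.getD (mask ^^^ (2 ^ j)) 0)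
        else acc2) B).length = B.length ∧
    ∀ k, ((List.range m).foldl (fun acc2 mask =>
        if mask &&& (2 ^ j) ≠ 0 then
          acc2.set mask (acc2.getD mask 0 + acc2.getD (mask ^^^ (2 ^ j)) 0)
        else acc2) B).getD k 0 =
      if k < m ∧ k &&& 2 ^ j ≠ 0 then B.getD k 0 + B.getD (k ^^^ 2 ^ j) 0 else B.getD k 0 := by
  induction m with
  | zero => simp
  | succ m ih =>
    obtain ⟨hlen, hinv⟩ := ih (Nat.le_of_succ_le hm)
    rw [List.range_succ, List.foldl_append]
    simp only [List.foldl_cons, List.foldl_nil]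
    by_cases hbit : m &&& 2 ^ j ≠ 0
    · rw [if_pos hbit]
      have hCm := hinv m
      rw [if_neg (by rintro ⟨h1, _⟩; omega)] at hCm
      have hclear : (m ^^^ 2 ^ j) &&& 2 ^ j = 0 := pv_xor_bit_clear m j hbit
      have hCx := hinv (m ^^^ 2 ^ j)
      rw [if_neg (by rintro ⟨_, h2⟩; exact h2 hclear)] at hCx
      constructor
      · rw [List.length_set, hlen]
      · intro k
        by_cases hk : k = m
        · subst hk
          rw [List.getD_eq_getElem?_getD,
            List.getElem?_set_self (by rw [hlen]; omega), Option.getD_some,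
            hCm, hCx, if_pos ⟨by omega, hbit⟩]
        · rw [List.getD_eq_getElem?_getD, List.getElem?_set_ne (fun h => hk h.symm),
            ← List.getD_eq_getElem?_getD, hinv k]
          by_cases hkm : k < m
          · exact if_congr (by simp [hkm, Nat.lt_succ_of_lt hkm]) rfl rfl
          · rw [if_neg (by omega), if_neg (by rintro ⟨h1, _⟩; omega)]
    · rw [if_neg hbit]
      refine ⟨hlen, fun k => ?_⟩
      rw [hinv k]
      by_cases hk : k = m
      · subst hk
        rw [if_neg (by omega), if_neg (by rintro ⟨_, h2⟩; exact hbit h2)]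
      · by_cases hkm : k < m
        · exact if_congr (by simp [hkm, Nat.lt_succ_of_lt hkm]) rfl rfl
        · rw [if_neg (by omega), if_neg (by rintro ⟨h1, _⟩; omega)]

theorem pv_sz_le (A : List Int) (hA : A ≠ []) : 2 ^ (A.length.size - 1) ≤ A.length := by
  have hpos : 0 < A.length := List.length_pos_iff.mpr hA
  have := Nat.lt_size.mp (Nat.sub_lt (Nat.size_pos.mpr hpos) Nat.one_pos)
  exact this

-- the outer loop invariant: after the passes for bits 0..j-1
theorem pv_outer_invariant (A : List Int) (hA : A ≠ []) (j : Nat)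
    (hj : j ≤ A.length.size - 1) :
    ((List.range j).foldl (fun acc i =>
        (List.range (2 ^ (A.length.size - 1))).foldl (fun acc2 mask =>
          if mask &&& (2 ^ i) ≠ 0 then
            acc2.set mask (acc2.getD mask 0 + acc2.getD (mask ^^^ (2 ^ i)) 0)
          else acc2) acc) A).length = A.length ∧
    ∀ k, ((List.range j).foldl (fun acc i =>
        (List.range (2 ^ (A.length.size - 1))).foldl (fun acc2 mask =>
          if mask &&& (2 ^ i) ≠ 0 then
            acc2.set mask (acc2.getD mask 0 + acc2.getD (mask ^^^ (2 ^ i)) 0)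
          else acc2) acc) A).getD k 0 =
      if k < 2 ^ (A.length.size - 1) then pvS A j k else A.getD k 0 := by
  induction j with
  | zero =>
    refine ⟨rfl, fun k => ?_⟩
    simp only [List.range_zero, List.foldl_nil, pvS_zero]
    split <;> rfl
  | succ j ih =>
    obtain ⟨hlen, hinv⟩ := ih (Nat.le_of_succ_le hj)
    rw [List.range_succ, List.foldl_append]
    simp only [List.foldl_cons, List.foldl_nil]
    obtain ⟨plen, pinv⟩ := pv_pass_invariant j (2 ^ (A.length.size - 1)) _
      (by rw [hlen]; exact pv_sz_le A hA)
    refine ⟨by rw [plen, hlen], fun k => ?_⟩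
    rw [pinv k]
    by_cases hk : k < 2 ^ (A.length.size - 1)
    · have hxlt : k ^^^ 2 ^ j < 2 ^ (A.length.size - 1) := by
        apply Nat.xor_lt_two_pow hk
        exact Nat.pow_lt_pow_right Nat.one_lt_two (by omega)
      rw [pvS_succ]
      by_cases hbit : k &&& 2 ^ j ≠ 0
      · rw [if_pos ⟨hk, hbit⟩, hinv k, hinv (k ^^^ 2 ^ j),
          if_pos hk, if_pos hxlt, if_pos hbit, if_pos hk]
      · rw [if_neg (by rintro ⟨_, h2⟩; exact hbit h2), hinv k, if_pos hk,
          if_neg hbit, add_zero, if_pos hk]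
    · rw [if_neg (by rintro ⟨h1, _⟩; exact hk h1), hinv k, if_neg hk, if_neg hk]

-- ===== VERDICT (by name: the statement is the Claim_ definition above) =====
theorem fzt_spec : Claim_equal_fzt := by
  intro A _
  unfold Spec_fzt
  by_cases hA : A = []
  · subst hA; rfl
  · obtain ⟨hlen, hinv⟩ := pv_outer_invariant A hA (A.length.size - 1) le_rfl
    have hszle := pv_sz_le A hA
    unfold fzt fzt_alt
    rw [if_neg hA]
    have htake : (A.take (2 ^ (A.length.size - 1))).length = 2 ^ (A.length.size - 1) := by
      rw [List.length_take]; omega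
    have hZlen : (pvZeta (A.take (2 ^ (A.length.size - 1)))).length = 2 ^ (A.length.size - 1) := by
      rw [pvZeta_length (A.length.size - 1) _ htake, htake]
    apply List.ext_getElem
    · rw [hlen]
      simp only [List.length_append, hZlen, List.length_drop]
      omega
    · intro i h1 h2
      have hgd : ∀ (l : List Int) (hi : i < l.length), l[i] = l.getD i 0 := by
        intro l hi
        rw [List.getD_eq_getElem?_getD, List.getElem?_eq_getElem hi, Option.getD_some]
      rw [hgd _ h1, hinv i]
      by_cases hk : i < 2 ^ (A.length.size - 1)
      · rw [if_pos hk, hgd _ h2, List.getD_eq_getElem?_getD,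
          List.getElem?_append_left (by omega), ← List.getD_eq_getElem?_getD,
          pvZeta_getD (A.length.size - 1) _ htake i (by omega),
          pvS_eq_T A (A.length.size - 1) i hk]
        apply Finset.sum_congr rfl
        intro t ht
        rw [Finset.mem_range] at ht
        rw [pv_getD_take A _ t ht]
      · rw [if_neg hk,
          List.getElem_append_right (by omega)]
        simp only [hZlen, List.getElem_drop]
        rw [getElem_congr_idx (show 2 ^ (A.length.size - 1) + (i - 2 ^ (A.length.size - 1)) = i by omega)]
        exact (hgd A (by omega)).symm
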